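-- pv_equiv track=rewrite | github.com/aniketk33/LeetcodeSolutions | arrays/min-penalty-shop.py | min_penalty
-- ===== SOURCE A (Python) =====
-- def min_penalty(customers):
--     n = len(customers)
--     result = float('inf')
--
--     # Prefix and postfix for N's and Y's.
--     # The extra zero is to cover the edge case
--     prefix_n = [0] * (n + 1)
--     postfix_y = [0] * (n + 1)
--
--     for i in range(1, n + 1):
--         # it will be the last position's value
--         prefix_n[i] = prefix_n[i - 1]
--         # only increment, when 'N' is present
--         if customers[i - 1] == "N":
--             prefix_n[i] += 1
--
--     # same for postfix of Y's
--     for i in range(n - 1, -1, -1):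
--         postfix_y[i] = postfix_y[i + 1]
--         if customers[i] == "Y":
--             postfix_y[i] += 1
--
--     min_idx = -1
--     for idx, val in enumerate(prefix_n):
--         # add them up and store the idx of min value of summation
--         penalty = prefix_n[idx] + postfix_y[idx]
--         if result > penalty:
--             result = penalty
--             min_idx = idx
--
--     return min_idx
-- ===== SOURCE B (Python) =====
-- def min_penalty(customers):
--     # penalty for closing at hour 0 = number of 'Y' hours
--     pen = sum(1 for c in customers if c == "Y")
--     best, min_idx = pen, 0
--     for i, c in enumerate(customers):
--         pen += 1 if c == "N" else (-1 if c == "Y" else 0)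
--         if pen < best:
--             best, min_idx = pen, i + 1
--     return min_idx
-- ===== Notes on version B (the rewrite author's own statement) =====
-- stated objective: simpler
-- what changed: Replaces the two prefix/postfix arrays and the third argmin pass with a single left-to-right pass maintaining a running penalty (start = count of 'Y', +1 on 'N', -1 on 'Y') and the first strict minimum index.
import Mathlib
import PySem

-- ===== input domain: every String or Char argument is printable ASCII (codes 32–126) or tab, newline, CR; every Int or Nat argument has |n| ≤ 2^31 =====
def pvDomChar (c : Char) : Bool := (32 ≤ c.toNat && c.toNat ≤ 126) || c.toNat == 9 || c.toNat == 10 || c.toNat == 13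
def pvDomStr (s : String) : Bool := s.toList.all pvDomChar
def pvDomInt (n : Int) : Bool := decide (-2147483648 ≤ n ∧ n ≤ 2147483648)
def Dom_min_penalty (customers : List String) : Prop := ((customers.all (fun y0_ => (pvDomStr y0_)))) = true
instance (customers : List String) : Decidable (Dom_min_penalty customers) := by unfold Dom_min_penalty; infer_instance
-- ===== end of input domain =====

-- B replaces A's prefix/postfix arrays and final argmin pass by one running-penalty pass (simpler, O(1) extra space).

-- ===== PORT A =====
-- the loop building prefix_n: prefix_n[i] = prefix_n[i-1] (+1 if customers[i-1] == "N")
def pvScanlN (a : Int) : List String → List Int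
  | [] => [a]
  | c :: rs => a :: pvScanlN (a + (if c == "N" then 1 else 0)) rs

-- the backward loop building postfix_y: postfix_y[i] = postfix_y[i+1] (+1 if customers[i] == "Y")
def pvScanrY : List String → List Int
  | [] => [0]
  | c :: rs =>
    let t := pvScanrY rs
    (t.headD 0 + (if c == "Y" then 1 else 0)) :: t

-- the final loop; state = (result : Option Int  -- none models float('inf'), min_idx, idx)
def pvLoopA : List (Int × Int) → Option Int × Int × Int → Int
  | [], st => st.2.1
  | (p, q) :: rest, (res, mi, idx) =>
    let penalty := p + q
    match res with
    | none => pvLoopA rest (some penalty, idx, idx + 1)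
    | some r =>
      if r > penalty then pvLoopA rest (some penalty, idx, idx + 1)
      else pvLoopA rest (some r, mi, idx + 1)

def min_penalty (customers : List String) : Int :=
  let prefix_n := pvScanlN 0 customers
  let postfix_y := pvScanrY customers
  pvLoopA (prefix_n.zip postfix_y) (none, -1, 0)

-- ===== PORT B =====
-- state = (pen, best, min_idx, i); i is the enumerate counter
def pvLoopB : List String → Int × Int × Int × Int → Int
  | [], st => st.2.2.1
  | c :: rs, (pen, best, mi, i) =>
    let pen' := pen + (if c == "N" then 1 else if c == "Y" then -1 else 0)
    if pen' < best then pvLoopB rs (pen', pen', i + 1, i + 1)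
    else pvLoopB rs (pen', best, mi, i + 1)

def min_penalty_alt (customers : List String) : Int :=
  let pen0 : Int := (customers.countP (fun c => c == "Y") : Nat)
  pvLoopB customers (pen0, pen0, 0, 0)

-- ===== PRECONDITION & SPEC =====
def Spec_min_penalty (customers : List String) (out : Int) : Prop := out = min_penalty_alt customers
instance (customers : List String) (out : Int) : Decidable (Spec_min_penalty customers out) := by unfold Spec_min_penalty; infer_instance

-- ===== CLAIM (what is proved, stated in full; the proofs are below) =====
def Claim_equal_min_penalty : Prop := ∀ (customers : List String), Dom_min_penalty customers → Spec_min_penalty customers (min_penalty customers)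

-- ===== LEMMAS AND PROOFS =====
def pvCY (l : List String) : Int := (l.countP (fun c => c == "Y") : Nat)

theorem pvCY_cons (c : String) (l : List String) :
    pvCY (c :: l) = pvCY l + (if c == "Y" then 1 else 0) := by
  by_cases h : c == "Y" <;> simp [pvCY, h]

theorem pvScanrY_head (l : List String) : (pvScanrY l).headD 0 = pvCY l := by
  induction l with
  | nil => simp [pvScanrY, pvCY]
  | cons c rs ih => simp only [pvScanrY, List.headD_cons]; rw [pvCY_cons, ih]

theorem pvZip_cons (a : Int) (c : String) (rs : List String) :
    (pvScanlN a (c :: rs)).zip (pvScanrY (c :: rs)) =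
      (a, pvCY rs + (if c == "Y" then 1 else 0)) ::
        (pvScanlN (a + (if c == "N" then 1 else 0)) rs).zip (pvScanrY rs) := by
  simp only [pvScanlN, pvScanrY, List.zip_cons_cons, pvScanrY_head]

theorem pvDelta (a : Int) (c : String) (rs : List String) :
    (a + (if c == "N" then 1 else 0)) + pvCY rs =
      (a + (pvCY rs + (if c == "Y" then 1 else 0)))
        + (if c == "N" then 1 else if c == "Y" then -1 else 0) := by
  by_cases hN : c == "N" <;> by_cases hY : c == "Y" <;> simp_all <;> ring

theorem pvLoopA_eq_loopB (rs : List String) :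
    ∀ (a b mi i : Int),
      pvLoopA ((pvScanlN a rs).zip (pvScanrY rs)) (some b, mi, i) =
        (if b > a + pvCY rs
          then pvLoopB rs (a + pvCY rs, a + pvCY rs, i, i)
          else pvLoopB rs (a + pvCY rs, b, mi, i)) := by
  induction rs with
  | nil =>
    intro a b mi i
    simp only [pvScanlN, pvScanrY, List.zip, List.zipWith, pvCY, List.countP_nil,
      Nat.cast_zero, add_zero, pvLoopA, pvLoopB]
  | cons c rs' ih =>
    intro a b mi i
    rw [pvZip_cons, pvCY_cons]
    by_cases hb : b > a + (pvCY rs' + (if c == "Y" then 1 else 0))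
    · rw [if_pos hb]
      simp only [pvLoopA, hb, if_true]
      rw [ih, pvDelta]
      simp only [pvLoopB]
    · rw [if_neg hb]
      simp only [pvLoopA, hb, if_false]
      rw [ih, pvDelta]
      simp only [pvLoopB]

theorem pv_main (customers : List String) :
    min_penalty customers = min_penalty_alt customers := by
  cases customers with
  | nil => simp [min_penalty, min_penalty_alt, pvScanlN, pvScanrY, pvLoopA, pvLoopB]
  | cons c rs =>
    show pvLoopA ((pvScanlN 0 (c :: rs)).zip (pvScanrY (c :: rs))) (none, -1, 0) = _
    rw [pvZip_cons]
    simp only [pvLoopA]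
    rw [pvLoopA_eq_loopB, pvDelta]
    have hpen0 : (0 : Int) + (pvCY rs + (if c == "Y" then 1 else 0)) = pvCY (c :: rs) := by
      rw [pvCY_cons]; ring
    rw [hpen0]
    show _ = min_penalty_alt (c :: rs)
    simp only [min_penalty_alt]
    have hc : ((List.countP (fun c => c == "Y") (c :: rs) : Nat) : Int) = pvCY (c :: rs) := rfl
    rw [hc]
    simp only [pvLoopB]

-- ===== VERDICT (by name: the statement is the Claim_ definition above) =====
theorem min_penalty_spec : Claim_equal_min_penalty := by
  intro customers _
  exact pv_main customers
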